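-- pv_equiv track=rewrite | github.com/CSC1204-DSA/DSA-Labs | 03. Data Structures/Arrays/Longest_Word.py | naive_longest_word
-- ===== SOURCE A (Python) =====
-- def naive_longest_word(string):
--     """
--     Returns the actual longest alphanumeric word from the given string.
--     Logic:
--     - Create a list `words` to store all unique words.
--     - Create a temporary list `word` to collect characters of the current alphanumeric segment.
--     - For each character:
--       * If alphanumeric, add it to `word` and increment count.
--       * If not, convert `word` to a string (if not empty or already in `words`) and add it to `words`.
--         Then reset `word` to empty.
--     - After the loop, handle any leftover word similarly.
--     - Track the maximum length encountered during iteration, and finally return the first word that matches this maximum length.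
--     """
--     count = 0
--     maximum = 0
--     words = []
--     word = []
--
--     for char in string:
--         if char.isalnum():
--             count += 1
--             word.append(char)
--         else:
--             if word not in words and word:
--                 words.append(''.join(word))
--                 word = []
--             maximum = max(maximum, count)
--             count = 0
--
--     # Handle any last word after the loop
--     maximum = max(maximum, count)
--     if word not in words and word:
--         words.append(''.join(word))
--
--     # Return the first word that matches the maximum length
--     for item in words:
--         if len(item) == maximum:
--             return item
-- ===== SOURCE B (Python) =====
-- def naive_longest_word(string):
--     best = None
--     cur = ''
--     for ch in string:
--         if ch.isalnum():
--             cur += ch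
--         else:
--             if cur and (best is None or len(cur) > len(best)):
--                 best = cur
--             cur = ''
--     if cur and (best is None or len(cur) > len(best)):
--         best = cur
--     return best
-- ===== Notes on version B (the rewrite author's own statement) =====
-- stated objective: simpler
-- what changed: Single pass keeping only the first word that reaches the running maximum length; no words list is built and no final rescan over it is made.
import Mathlib
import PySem

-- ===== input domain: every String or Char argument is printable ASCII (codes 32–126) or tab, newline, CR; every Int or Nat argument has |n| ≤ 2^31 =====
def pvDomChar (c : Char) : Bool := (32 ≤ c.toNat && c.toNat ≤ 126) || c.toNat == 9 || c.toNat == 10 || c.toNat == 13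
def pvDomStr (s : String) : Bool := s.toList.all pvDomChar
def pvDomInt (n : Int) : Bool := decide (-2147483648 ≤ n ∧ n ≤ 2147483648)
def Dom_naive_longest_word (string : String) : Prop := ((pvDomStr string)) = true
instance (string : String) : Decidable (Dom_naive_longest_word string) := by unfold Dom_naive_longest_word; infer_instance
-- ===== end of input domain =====

-- B is a single pass keeping only the first word reaching the running maximum length
-- (no words list, no final scan); A builds the full words list and rescans it.

-- ===== PORT A =====
-- Python strings in `words` are represented as their character lists (''.join(word)
-- keeps the same characters); the returned word is converted with String.ofList.
-- Note: Python's `word not in words` is always True there (a list is never equal to the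
-- strings stored in `words`), so the port appends whenever `word` is nonempty.

-- the loop over the characters; state = (count, maximum, words, word)
def naiveA_loop : List Char → Nat × Nat × List (List Char) × List Char →
    Nat × Nat × List (List Char) × List Char
  | [], st => st
  | c :: cs, (count, maximum, words, word) =>
    if PySem.Chars.isalnum c then
      naiveA_loop cs (count + 1, maximum, words, word ++ [c])
    else
      if word ≠ [] then
        naiveA_loop cs (0, max maximum count, words ++ [word], [])
      else
        naiveA_loop cs (0, max maximum count, words, word)

-- the final scan: first item whose length equals maximum
def naiveA_find : List (List Char) → Nat → Option (List Char)
  | [], _ => none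
  | w :: ws, m => if w.length = m then some w else naiveA_find ws m

def naive_longest_word (string : String) : Option String :=
  let (count, maximum, words, word) := naiveA_loop string.toList (0, 0, [], [])
  let maximum := max maximum count
  let words := if word ≠ [] then words ++ [word] else words
  (naiveA_find words maximum).map String.ofList

-- ===== PORT B =====
-- `best = cur` update of Source B (guard `cur and (best is None or len(cur) > len(best))`)
def naiveB_upd (best : Option (List Char)) (cur : List Char) : Option (List Char) :=
  match best with
  | none => if cur ≠ [] then some cur else none
  | some b => if cur ≠ [] ∧ cur.length > b.length then some cur else some b

def naiveB_loop : List Char → Option (List Char) → List Char → Option (List Char) × List Char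
  | [], best, cur => (best, cur)
  | c :: cs, best, cur =>
    if PySem.Chars.isalnum c then
      naiveB_loop cs best (cur ++ [c])
    else
      naiveB_loop cs (naiveB_upd best cur) []

def naive_longest_word_alt (string : String) : Option String :=
  let (best, cur) := naiveB_loop string.toList none []
  (naiveB_upd best cur).map String.ofList

-- ===== PRECONDITION & SPEC =====
def Spec_naive_longest_word (string : String) (out : Option String) : Prop := out = naive_longest_word_alt string
instance (string : String) (out : Option String) : Decidable (Spec_naive_longest_word string out) := by unfold Spec_naive_longest_word; infer_instance

-- ===== CLAIM (what is proved, stated in full; the proofs are below) =====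
def Claim_equal_naive_longest_word : Prop := ∀ (string : String), Dom_naive_longest_word string → Spec_naive_longest_word string (naive_longest_word string)

-- ===== LEMMAS AND PROOFS =====

-- maximum of the word lengths
def pvMaxLen (ws : List (List Char)) : Nat := ws.foldr (fun w m => max w.length m) 0

theorem pvMaxLen_append (ws : List (List Char)) (w : List Char) :
    pvMaxLen (ws ++ [w]) = max (pvMaxLen ws) w.length := by
  induction ws with
  | nil => simp [pvMaxLen]
  | cons x xs ih => simp [pvMaxLen] at ih ⊢; omega

theorem naiveA_find_append (xs ys : List (List Char)) (m : Nat) :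
    naiveA_find (xs ++ ys) m = (naiveA_find xs m).orElse (fun _ => naiveA_find ys m) := by
  induction xs with
  | nil => simp [naiveA_find]
  | cons x xs ih =>
    simp only [List.cons_append, naiveA_find]
    split <;> simp [ih]

theorem naiveA_find_gt (ws : List (List Char)) (m : Nat) (h : pvMaxLen ws < m) :
    naiveA_find ws m = none := by
  induction ws with
  | nil => simp [naiveA_find]
  | cons x xs ih =>
    simp only [pvMaxLen, List.foldr] at h
    simp only [naiveA_find]
    rw [if_neg (by omega)]
    exact ih (by simpa [pvMaxLen] using (by omega : xs.foldr (fun w m => max w.length m) 0 < m))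

-- if naiveA_find returns some, the found word has the queried length
theorem naiveA_find_len (ws : List (List Char)) (m : Nat) (b : List Char)
    (h : naiveA_find ws m = some b) : b.length = m := by
  induction ws with
  | nil => simp [naiveA_find] at h
  | cons x xs ih =>
    simp only [naiveA_find] at h
    split at h
    · next hl => cases h; omega
    · exact ih h

-- at m = pvMaxLen ws, naiveA_find succeeds whenever ws ≠ []
theorem naiveA_find_maxLen_isSome (ws : List (List Char)) (h : ws ≠ []) :
    ∃ b, naiveA_find ws (pvMaxLen ws) = some b := by
  induction ws with
  | nil => exact absurd rfl h
  | cons x xs ih =>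
    by_cases hx : x.length = pvMaxLen (x :: xs)
    · exact ⟨x, by simp [naiveA_find, hx]⟩
    · have hle : x.length ≤ pvMaxLen (x :: xs) := Nat.le_max_left _ _
      have hlt : x.length < pvMaxLen (x :: xs) := by omega
      have hxs : xs ≠ [] := by
        rintro rfl; exact hx (by simp [pvMaxLen])
      have hcons : pvMaxLen (x :: xs) = max x.length (pvMaxLen xs) := rfl
      have hmax : pvMaxLen (x :: xs) = pvMaxLen xs := by omega
      obtain ⟨b, hb⟩ := ih hxs
      refine ⟨b, ?_⟩
      rw [hmax]
      simpa [naiveA_find, hmax ▸ hx] using hb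

-- the key step: completing the current word updates "first longest" the same way on both sides
theorem pvUpd_eq (words : List (List Char)) (word : List Char) (best : Option (List Char))
    (hbest : best = naiveA_find words (pvMaxLen words)) :
    naiveB_upd best word
      = naiveA_find (if word ≠ [] then words ++ [word] else words)
          (max (pvMaxLen words) word.length) := by
  by_cases hw : word = []
  · subst hw
    cases best <;> simp_all [naiveB_upd]
  · rw [if_pos (by simpa using hw)]
    have hw1 : 1 ≤ word.length := by
      cases word with | nil => exact absurd rfl hw | cons a l => simp
    cases best with
    | none =>
      have hwsnil : words = [] := by
        by_contra hne
        obtain ⟨b, hb⟩ := naiveA_find_maxLen_isSome words hne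
        rw [← hbest] at hb; simp at hb
      subst hwsnil
      simp [naiveB_upd, hw, naiveA_find, pvMaxLen]
    | some b =>
      have hblen : b.length = pvMaxLen words := naiveA_find_len words _ b hbest.symm
      by_cases hgt : word.length > b.length
      · have hlt : pvMaxLen words < max (pvMaxLen words) word.length := by omega
        rw [naiveA_find_append, naiveA_find_gt words _ hlt]
        simp [naiveB_upd, hw, hgt, naiveA_find,
          Nat.max_eq_right (by omega : pvMaxLen words ≤ word.length), Option.orElse]
      · have hmax : max (pvMaxLen words) word.length = pvMaxLen words := by omega
        rw [hmax, naiveA_find_append, ← hbest]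
        simp [naiveB_upd, hw, hgt, Option.orElse]

-- the simultaneous loop invariant
theorem pvLoop (cs : List Char) :
    ∀ (maximum : Nat) (words : List (List Char)) (word : List Char) (best : Option (List Char)),
    maximum = pvMaxLen words →
    best = naiveA_find words (pvMaxLen words) →
    (let (c', m', ws', wd') := naiveA_loop cs (word.length, maximum, words, word)
     let (b', cur') := naiveB_loop cs best word
     c' = wd'.length ∧ m' = pvMaxLen ws' ∧
       b' = naiveA_find ws' (pvMaxLen ws') ∧ cur' = wd') := by
  induction cs with
  | nil =>
    intro maximum words word best hm hb
    exact ⟨rfl, hm, hb, rfl⟩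
  | cons c cs ih =>
    intro maximum words word best hm hb
    by_cases hc : PySem.Chars.isalnum c = true
    · simpa [naiveA_loop, naiveB_loop, hc] using ih maximum words (word ++ [c]) best hm hb
    · simp only [naiveA_loop, naiveB_loop, hc, if_false, Bool.false_eq_true]
      by_cases hw : word = []
      · subst hw
        simp only [ne_eq, not_true_eq_false, if_false]
        have hb' : naiveB_upd best [] = naiveA_find words (pvMaxLen words) := by
          cases best <;> simp_all [naiveB_upd]
        have := ih (max maximum 0) words [] (naiveB_upd best []) (by simpa using hm) hb'
        simpa using this
      · rw [if_pos (by simpa using hw)]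
        have hm' : max maximum word.length = pvMaxLen (words ++ [word]) := by
          rw [pvMaxLen_append]; omega
        have hb' : naiveB_upd best word
            = naiveA_find (words ++ [word]) (pvMaxLen (words ++ [word])) := by
          have h0 := pvUpd_eq words word best hb
          rw [if_pos (by simpa using hw)] at h0
          rw [h0, pvMaxLen_append]
        have := ih (max maximum word.length) (words ++ [word]) [] (naiveB_upd best word) hm' hb'
        simpa using this

-- ===== VERDICT (by name: the statement is the Claim_ definition above) =====
theorem naive_longest_word_spec : Claim_equal_naive_longest_word := by
  intro s _
  unfold Spec_naive_longest_word naive_longest_word naive_longest_word_alt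
  have h := pvLoop s.toList 0 [] [] none rfl (by simp [naiveA_find])
  rcases hA : naiveA_loop s.toList (0, 0, [], []) with ⟨count, maximum, words, word⟩
  rcases hB : naiveB_loop s.toList none [] with ⟨best, cur⟩
  simp only [List.length_nil] at h
  rw [hA, hB] at h
  obtain ⟨hc, hm, hbest, hcur⟩ := h
  dsimp only at hc hm hbest hcur
  subst hc hm hcur hbest
  exact congrArg (Option.map String.ofList)
    (pvUpd_eq _ _ _ rfl).symm
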